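-- pv_equiv track=rewrite | github.com/sungchan1/CodingTest-solve | 프로그래머스/힙/더 맵게.py | solution
-- ===== SOURCE A (Python) =====
-- import heapq
--
-- def solution(scoville, K):
--     answer = 0
--     heapq.heapify(scoville)
--     while len(scoville) > 1 :
--         min_1 = heapq.heappop(scoville)
--         if min_1 >= K :
--             return answer
--
--         else :
--             min_2 = heapq.heappop(scoville)
--             heapq.heappush(scoville, min_1+min_2*2)
--             answer += 1
--     if heapq.heappop(scoville) >= K :
--         return answer
--     else :
--         return -1
-- ===== SOURCE B (Python) =====
-- def solution(scoville, K):
--     bowl = list(scoville)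
--     answer = 0
--     while True:
--         lo = hi = None
--         for x in bowl:          # one pass: track the two smallest of the unordered bag
--             if lo is None or x < lo:
--                 lo, hi = x, lo
--             elif hi is None or x < hi:
--                 hi = x
--         if lo >= K:
--             return answer
--         if hi is None:
--             return -1
--         bowl.remove(lo)
--         bowl.remove(hi)
--         bowl.append(lo + hi * 2)
--         answer += 1
-- ===== Notes on version B (the rewrite author's own statement) =====
-- stated objective: alternative
-- what changed: B drops the priority structure entirely: it keeps the foods as an unordered bag and finds the two smallest with a single linear scan per round (one-pass double-minimum tracking), then removes them and appends the mix, instead of A's heapify/heappop/heappush; Pre_ excludes the empty list, on which A's heappop raises IndexError (B raises TypeError there too).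
import Mathlib
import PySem

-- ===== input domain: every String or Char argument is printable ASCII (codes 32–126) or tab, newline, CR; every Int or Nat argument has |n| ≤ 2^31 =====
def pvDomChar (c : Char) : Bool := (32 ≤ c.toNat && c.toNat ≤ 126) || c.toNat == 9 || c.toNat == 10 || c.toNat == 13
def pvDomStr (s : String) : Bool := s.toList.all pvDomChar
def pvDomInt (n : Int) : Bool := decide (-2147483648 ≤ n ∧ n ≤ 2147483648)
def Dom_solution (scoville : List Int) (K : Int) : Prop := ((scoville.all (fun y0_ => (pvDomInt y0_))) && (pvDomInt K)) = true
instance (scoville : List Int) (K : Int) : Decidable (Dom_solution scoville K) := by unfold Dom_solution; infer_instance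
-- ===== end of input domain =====

-- B replaces the heap by an unordered bag scanned once per round for its two smallest
-- (one-pass double-minimum selection); equal return values proved on nonempty input.
-- (A mutates `scoville` in place into a heap, B does not mutate it — the claim is about the return value only.)

-- ===== PORT A =====
-- heapq is a library call, ported by hand: a Python heap's observable behaviour through
-- heappop/heappush is that of a multiset with extract-min (elements are Ints, so equal
-- elements are indistinguishable); heapify rearranges in place and keeps the multiset;
-- heappop returns the minimum and removes one copy of it; heappush adds the element.
-- This is exact for the return value of `solution`.
def pyHeapPop (l : List Int) : Int × List Int :=
  match l.min? with
  | some m => (m, l.erase m)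
  | none => (0, [])   -- heappop on an empty heap raises IndexError; excluded by Pre_solution

def heapLoopA : Nat → Int → List Int → Int → Int
  | fuel + 1, answer, heap, K =>
    if heap.length > 1 then
      let p := pyHeapPop heap
      if p.1 ≥ K then answer
      else
        let q := pyHeapPop p.2
        heapLoopA fuel (answer + 1) (q.2 ++ [p.1 + q.1 * 2]) K
    else
      if (pyHeapPop heap).1 ≥ K then answer else -1
  | 0, _, _, _ => 0   -- unreachable: fuel = heap size ≥ 1 throughout

def solution (scoville : List Int) (K : Int) : Int :=
  heapLoopA scoville.length 0 scoville K

-- ===== PORT B =====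
-- one step of B's single-pass "track the two smallest" scan (lo/hi are Python's lo/hi)
def twoMinStep (p : Option Int × Option Int) (x : Int) : Option Int × Option Int :=
  match p with
  | (none, _) => (some x, none)                 -- lo, hi = x, lo  (lo was None)
  | (some lo, hi) =>
    if x < lo then (some x, some lo)            -- lo, hi = x, lo
    else
      match hi with
      | none => (some lo, some x)               -- hi = x  (hi was None)
      | some h => if x < h then (some lo, some x) else (some lo, some h)

def loopB : Nat → Int → List Int → Int → Int
  | fuel + 1, answer, bowl, K =>
    match bowl.foldl twoMinStep (none, none) with
    | (some lo, hiOpt) =>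
      if lo ≥ K then answer
      else
        match hiOpt with
        | none => -1
        | some hi =>
          match PySem.List.remove? bowl lo with
          | some b1 =>
            match PySem.List.remove? b1 hi with
            | some b2 => loopB fuel (answer + 1) (b2 ++ [lo + hi * 2]) K
            | none => 0                          -- unreachable: hi ∈ b1
          | none => 0                            -- unreachable: lo ∈ bowl
    | (none, _) => 0                             -- empty bowl: excluded by Pre_solution
  | 0, _, _, _ => 0                              -- unreachable: fuel = bowl size ≥ 1 throughout

def solution_alt (scoville : List Int) (K : Int) : Int :=
  loopB scoville.length 0 scoville K

-- ===== PRECONDITION & SPEC =====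
-- Pre_ excludes only the empty list, on which A's heappop raises IndexError (B's `lo >= K` with lo = None raises too).
def Pre_solution (scoville : List Int) (K : Int) : Prop := scoville ≠ []
instance (scoville : List Int) (K : Int) : Decidable (Pre_solution scoville K) := by unfold Pre_solution; infer_instance
def pvWitness_solution : List Int × Int := ([1, 2, 3, 9, 10, 12], 7)
def Spec_solution (scoville : List Int) (K : Int) (out : Int) : Prop := out = solution_alt scoville K
instance (scoville : List Int) (K : Int) (out : Int) : Decidable (Spec_solution scoville K out) := by unfold Spec_solution; infer_instance

-- ===== CLAIM (what is proved, stated in full; the proofs are below) =====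
def Claim_equal_solution : Prop := ∀ (scoville : List Int) (K : Int), Dom_solution scoville K → Pre_solution scoville K → Spec_solution scoville K (solution scoville K)

-- ===== LEMMAS AND PROOFS =====

-- the pure value of B's scan: the minimum and the minimum-after-one-erase
def sel2 (l : List Int) : Option Int × Option Int :=
  match l.min? with
  | none => (none, none)
  | some m => (some m, (l.erase m).min?)

theorem min?_perm {h l : List Int} (hp : h.Perm l) : h.min? = l.min? := by
  cases hl : l.min? with
  | none =>
    rw [List.min?_eq_none_iff] at hl ⊢
    subst hl; exact hp.eq_nil
  | some m =>
    rw [List.min?_eq_some_iff] at hl ⊢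
    exact ⟨hp.mem_iff.mpr hl.1, fun b hb => hl.2 b (hp.mem_iff.mp hb)⟩

theorem sel2_append (l : List Int) (x : Int) :
    twoMinStep (sel2 l) x = sel2 (l ++ [x]) := by
  cases hl : l.min? with
  | none =>
    rw [List.min?_eq_none_iff] at hl
    subst hl
    simp [sel2, twoMinStep, List.min?]
  | some m =>
    obtain ⟨hmem, hmin⟩ := List.min?_eq_some_iff.mp hl
    by_cases hx : x < m
    · have hxl : x ∉ l := fun hxm => absurd (hmin x hxm) (not_le.mpr hx)
      have h1 : (l ++ [x]).min? = some x := by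
        rw [List.min?_eq_some_iff]
        refine ⟨by simp, fun b hb => ?_⟩
        rcases List.mem_append.mp hb with hb | hb
        · exact le_of_lt (lt_of_lt_of_le hx (hmin b hb))
        · simp at hb; omega
      have h2 : (l ++ [x]).erase x = l := by
        rw [List.erase_append, if_neg hxl]; simp
      simp [sel2, twoMinStep, hl, h1, h2, hx]
    · have h1 : (l ++ [x]).min? = some m := by
        rw [List.min?_eq_some_iff]
        refine ⟨List.mem_append.mpr (Or.inl hmem), fun b hb => ?_⟩
        rcases List.mem_append.mp hb with hb | hb
        · exact hmin b hb
        · simp at hb; omega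
      have h2 : (l ++ [x]).erase m = l.erase m ++ [x] := by
        rw [List.erase_append, if_pos hmem]
      cases he : (l.erase m).min? with
      | none =>
        rw [List.min?_eq_none_iff] at he
        simp only [sel2, twoMinStep, hl, h1, h2, he, List.nil_append]
        rw [if_neg hx]
        simp [List.min?]
      | some h2v =>
        obtain ⟨hmem2, hmin2⟩ := List.min?_eq_some_iff.mp he
        by_cases hxh : x < h2v
        · have h3 : (l.erase m ++ [x]).min? = some x := by
            rw [List.min?_eq_some_iff]
            refine ⟨by simp, fun b hb => ?_⟩
            rcases List.mem_append.mp hb with hb | hb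
            · exact le_of_lt (lt_of_lt_of_le hxh (hmin2 b hb))
            · simp at hb; omega
          simp [sel2, twoMinStep, hl, h1, h2, he, hx, hxh, h3]
        · have h3 : (l.erase m ++ [x]).min? = some h2v := by
            rw [List.min?_eq_some_iff]
            refine ⟨List.mem_append.mpr (Or.inl hmem2), fun b hb => ?_⟩
            rcases List.mem_append.mp hb with hb | hb
            · exact hmin2 b hb
            · simp at hb; omega
          simp [sel2, twoMinStep, hl, h1, h2, he, hx, hxh, h3]

theorem twoMin_eq_sel2 (l : List Int) :
    l.foldl twoMinStep (none, none) = sel2 l := by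
  induction l using List.reverseRecOn with
  | nil => rfl
  | append_singleton l x ih => rw [List.foldl_append, List.foldl_cons, List.foldl_nil, ih, sel2_append]

theorem loop_eq (fuel : Nat) : ∀ (answer : Int) (h b : List Int) (K : Int),
    h.Perm b → b ≠ [] → h.length = fuel →
    heapLoopA fuel answer h K = loopB fuel answer b K := by
  induction fuel with
  | zero => intro answer h b K _ _ _; rfl
  | succ n ih =>
    intro answer h b K hp hne hlen
    obtain ⟨m, hm⟩ : ∃ m, b.min? = some m := by
      cases hb : b.min? with
      | none => exact absurd (List.min?_eq_none_iff.mp hb) hne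
      | some m => exact ⟨m, rfl⟩
    have hhm : h.min? = some m := (min?_perm hp).trans hm
    have hmemb : m ∈ b := List.min?_mem hm
    have hmemh : m ∈ h := List.min?_mem hhm
    have hbl : b.length = n + 1 := hp.length_eq ▸ hlen
    have hfold : b.foldl twoMinStep (none, none) = (some m, (b.erase m).min?) := by
      rw [twoMin_eq_sel2]; simp [sel2, hm]
    by_cases h2 : b.length > 1
    · -- at least two elements
      have hh2 : h.length > 1 := hp.length_eq ▸ h2
      have hpe : (h.erase m).Perm (b.erase m) := hp.erase m
      obtain ⟨m2, hm2⟩ : ∃ m2, (b.erase m).min? = some m2 := by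
        cases hb : (b.erase m).min? with
        | none =>
          exfalso
          have hlen2 := List.length_erase_of_mem hmemb
          rw [List.min?_eq_none_iff.mp hb] at hlen2
          simp at hlen2
          omega
        | some m2 => exact ⟨m2, rfl⟩
      have hhm2 : (h.erase m).min? = some m2 := (min?_perm hpe).trans hm2
      have hmem2b : m2 ∈ b.erase m := List.min?_mem hm2
      have hmem2h : m2 ∈ h.erase m := List.min?_mem hhm2
      simp only [heapLoopA, loopB, hfold, if_pos hh2, pyHeapPop, hhm, hhm2]
      by_cases hK : m ≥ K
      · simp [hK]
      · simp only [hK, if_false]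
        simp only [hm2, PySem.List.remove?_eq_some_erase b m hmemb,
          PySem.List.remove?_eq_some_erase (b.erase m) m2 hmem2b]
        apply ih
        · exact (hpe.erase m2).append_right _
        · simp
        · have e1 := List.length_erase_of_mem hmemh
          have e2 := List.length_erase_of_mem hmem2h
          simp only [List.length_append, e2, e1, List.length_cons, List.length_nil]
          omega
    · -- exactly one element
      have hb1 : b.length = 1 := by omega
      have hh1 : ¬ h.length > 1 := by rw [hp.length_eq]; omega
      have hbe : b.erase m = [] := by
        have := List.length_erase_of_mem hmemb
        rw [hb1] at this
        exact List.length_eq_zero_iff.mp this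
      simp only [heapLoopA, loopB, hfold, if_neg hh1, pyHeapPop, hhm, hbe]
      simp [List.min?]

theorem solution_eq (scoville : List Int) (K : Int) (hne : scoville ≠ []) :
    solution scoville K = solution_alt scoville K := by
  unfold solution solution_alt
  exact loop_eq _ _ _ _ _ (List.Perm.refl _) hne rfl

-- ===== VERDICT (by name: the statement is the Claim_ definition above) =====
theorem solution_spec : Claim_equal_solution := by
  intro scoville K _ hne
  unfold Spec_solution
  exact solution_eq scoville K hne
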